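-- pv_equiv track=rewrite | github.com/djh97/IC | informed_consent/evaluation.py | deduplicate_qa_index_rows
-- ===== SOURCE A (Python) =====
-- from typing import Any
--
-- def deduplicate_qa_index_rows(rows: list[dict[str, Any]]) -> list[dict[str, Any]]:
--     latest_by_question_id: dict[str, dict[str, Any]] = {}
--     ordered_question_ids: list[str] = []
--     for row in rows:
--         question_id = str(row.get("question_id", "")).strip()
--         if not question_id:
--             continue
--         if question_id not in latest_by_question_id:
--             ordered_question_ids.append(question_id)
--         current = latest_by_question_id.get(question_id)
--         if current is None:
--             latest_by_question_id[question_id] = row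
--             continue
--
--         current_has_answer = bool(current.get("answer_path"))
--         incoming_has_answer = bool(row.get("answer_path"))
--         if incoming_has_answer and not current_has_answer:
--             latest_by_question_id[question_id] = row
--             continue
--         if incoming_has_answer == current_has_answer:
--             latest_by_question_id[question_id] = row
--
--     return [latest_by_question_id[question_id] for question_id in ordered_question_ids if question_id in latest_by_question_id]
-- ===== SOURCE B (Python) =====
-- from typing import Any
--
--
-- def deduplicate_qa_index_rows(rows: list[dict[str, Any]]) -> list[dict[str, Any]]:
--     # Group rows by normalized question_id, then pick each group's winner:
--     # the last row with a truthy answer_path, else the group's last row.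
--     groups: dict[str, list[dict[str, Any]]] = {}
--     for row in rows:
--         question_id = str(row.get("question_id", "")).strip()
--         if question_id:
--             groups.setdefault(question_id, []).append(row)
--     result = []
--     for group in groups.values():
--         winner = None
--         for r in group:
--             if r.get("answer_path"):
--                 winner = r
--         result.append(winner if winner is not None else group[-1])
--     return result
-- ===== Notes on version B (the rewrite author's own statement) =====
-- stated objective: simpler
-- what changed: Replaces A's incremental per-row tie-break state machine (latest dict + ordered id list + three-way replacement branches) with a two-pass group-then-reduce: group rows by normalized question_id, then pick each group's winner as the last answer-bearing row, falling back to the group's last row.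
import Mathlib
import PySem

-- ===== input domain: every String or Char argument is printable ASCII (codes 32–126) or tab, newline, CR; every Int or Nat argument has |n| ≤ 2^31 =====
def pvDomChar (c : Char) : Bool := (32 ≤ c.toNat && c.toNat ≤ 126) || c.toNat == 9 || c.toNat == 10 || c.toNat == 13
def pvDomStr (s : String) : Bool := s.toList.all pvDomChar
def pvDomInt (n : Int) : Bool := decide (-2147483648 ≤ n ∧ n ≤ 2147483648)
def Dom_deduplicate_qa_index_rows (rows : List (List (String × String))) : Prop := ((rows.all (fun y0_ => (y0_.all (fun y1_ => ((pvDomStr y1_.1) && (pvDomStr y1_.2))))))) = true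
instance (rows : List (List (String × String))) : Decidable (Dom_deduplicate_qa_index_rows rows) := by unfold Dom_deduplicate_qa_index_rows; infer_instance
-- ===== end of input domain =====

-- B replaces A's incremental latest-row state machine with a group-by-id-then-reduce
-- decomposition (objective: simpler); same return value, no observable mutation.

-- shared helpers (both Pythons compute these the same way)
-- row.get(k, "") : first-match association-list lookup
def pvRowGet (row : List (String × String)) (k : String) : String :=
  PySem.Dict.getD (PySem.Dict.mk row) k ""

-- str(row.get("question_id", "")).strip()  (str() is the identity on strings here)
def pvQid (row : List (String × String)) : String :=
  PySem.Str.strip (pvRowGet row "question_id")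

-- bool(row.get("answer_path")) : truthy iff present and non-empty
def pvHasAns (row : List (String × String)) : Bool :=
  pvRowGet row "answer_path" != ""

-- ===== PORT A =====
-- one iteration of A's loop over (latest_by_question_id, ordered_question_ids)
def pvStepA (st : PySem.Dict String (List (String × String)) × List String)
    (row : List (String × String)) :
    PySem.Dict String (List (String × String)) × List String :=
  let q := pvQid row
  if q = "" then st
  else
    let ord := if st.1.contains q then st.2 else st.2 ++ [q]
    match st.1.get? q with
    | none => (st.1.insert q row, ord)
    | some current =>
      if pvHasAns row && !pvHasAns current then (st.1.insert q row, ord)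
      else if pvHasAns row == pvHasAns current then (st.1.insert q row, ord)
      else (st.1, ord)

def deduplicate_qa_index_rows (rows : List (List (String × String))) :
    List (List (String × String)) :=
  let st := rows.foldl pvStepA (PySem.Dict.empty, [])
  -- [latest[q] for q in ordered if q in latest]
  st.2.filterMap (fun q => st.1.get? q)

-- ===== PORT B =====
-- groups.setdefault(q, []).append(row)
def pvGroupStep (g : PySem.Dict String (List (List (String × String))))
    (row : List (String × String)) :
    PySem.Dict String (List (List (String × String))) :=
  let q := pvQid row
  if q = "" then g else g.modify q [] (· ++ [row])

-- winner loop: last answer-bearing row, else None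
def pvWf (w : Option (List (String × String))) (r : List (String × String)) :
    Option (List (String × String)) :=
  if pvHasAns r then some r else w

-- winner if winner is not None else group[-1]  (groups are never empty, so the
-- .getD [] default of the group[-1] indexing is never reached)
def pvPick (grp : List (List (String × String))) : List (String × String) :=
  match grp.foldl pvWf none with
  | some w => w
  | none => (PySem.List.pyGet? grp (-1)).getD []

def deduplicate_qa_index_rows_alt (rows : List (List (String × String))) :
    List (List (String × String)) :=
  ((rows.foldl pvGroupStep PySem.Dict.empty).values).map pvPick

-- ===== PRECONDITION & SPEC =====
def Spec_deduplicate_qa_index_rows (rows : List (List (String × String))) (out : List (List (String × String))) : Prop := out = deduplicate_qa_index_rows_alt rows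
instance (rows : List (List (String × String))) (out : List (List (String × String))) : Decidable (Spec_deduplicate_qa_index_rows rows out) := by unfold Spec_deduplicate_qa_index_rows; infer_instance

-- ===== CLAIM (what is proved, stated in full; the proofs are below) =====
def Claim_equal_deduplicate_qa_index_rows : Prop := ∀ (rows : List (List (String × String))), Dom_deduplicate_qa_index_rows rows → Spec_deduplicate_qa_index_rows rows (deduplicate_qa_index_rows rows)

-- ===== LEMMAS AND PROOFS =====

-- A's replacement rule as a single step on the current winner
def pvStep2 (w : Option (List (String × String))) (r : List (String × String)) :
    Option (List (String × String)) :=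
  match w with
  | none => some r
  | some cur => if pvHasAns r || !pvHasAns cur then some r else some cur

-- A's winner of a whole group, computed incrementally
def pvAW (grp : List (List (String × String))) : Option (List (String × String)) :=
  grp.foldl pvStep2 none

-- the winner fold from any accumulator, in terms of the fold from none
theorem pvWf_foldl_acc (l : List (List (String × String)))
    (a : Option (List (String × String))) :
    l.foldl pvWf a = match l.foldl pvWf none with
      | some y => some y
      | none => a := by
  induction l generalizing a with
  | nil => simp
  | cons r l ih =>
    simp only [List.foldl_cons]
    rw [ih (pvWf a r), ih (pvWf none r)]
    cases h : l.foldl pvWf none with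
    | some y => rfl
    | none =>
      by_cases hr : pvHasAns r <;> simp [pvWf, hr]

-- A's incremental winner agrees with B's pick on every non-empty group
theorem pvPick_eq_foldl (rest : List (List (String × String)))
    (w : List (String × String)) :
    rest.foldl pvStep2 (some w) = some (pvPick (w :: rest)) := by
  induction rest generalizing w with
  | nil =>
    by_cases hw : pvHasAns w <;>
      simp [pvPick, pvWf, hw, PySem.List.pyGet?_neg_one]
  | cons r rest ih =>
    simp only [List.foldl_cons]
    have hstep : pvStep2 (some w) r =
        some (if pvHasAns r || !pvHasAns w then r else w) := by
      cases h : pvHasAns r || !pvHasAns w <;> simp [pvStep2, h]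
    rw [hstep, ih]
    congr 1
    -- pvPick (w :: r :: rest) = pvPick (w' :: rest)
    have hL : pvPick (w :: r :: rest) =
        match rest.foldl pvWf (pvWf (pvWf none w) r) with
        | some y => y
        | none => ((w :: r :: rest).getLast?).getD [] := by
      simp [pvPick, PySem.List.pyGet?_neg_one]
    have hR : ∀ w', pvPick (w' :: rest) =
        match rest.foldl pvWf (pvWf none w') with
        | some y => y
        | none => ((w' :: rest).getLast?).getD [] := by
      intro w'; simp [pvPick, PySem.List.pyGet?_neg_one]
    rw [hL, hR]
    rw [pvWf_foldl_acc rest (pvWf (pvWf none w) r),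
        pvWf_foldl_acc rest (pvWf none (if pvHasAns r || !pvHasAns w then r else w))]
    cases hwin : rest.foldl pvWf none with
    | some y => rfl
    | none =>
      by_cases hr : pvHasAns r <;> by_cases hw : pvHasAns w <;>
        simp [pvWf, hr, hw, List.getLast?_cons_cons]

theorem pvAW_cons (x : List (String × String)) (l : List (List (String × String))) :
    pvAW (x :: l) = some (pvPick (x :: l)) := by
  simp only [pvAW, List.foldl_cons]
  have : pvStep2 none x = some x := rfl
  rw [this, pvPick_eq_foldl]

-- the loop invariant: A's (dict, order) state determined by B's groups
theorem pvMain (rows : List (List (String × String)))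
    (d : PySem.Dict String (List (String × String))) (ord : List String)
    (g : PySem.Dict String (List (List (String × String))))
    (hord : ord = g.keys) (hnd : g.keys.Nodup)
    (hval : ∀ q, d.get? q = pvAW (g.getD q []))
    (hne : ∀ q, g.contains q = true → g.getD q [] ≠ []) :
    (rows.foldl pvStepA (d, ord)).2 = (rows.foldl pvGroupStep g).keys ∧
    (rows.foldl pvGroupStep g).keys.Nodup ∧
    (∀ q, (rows.foldl pvStepA (d, ord)).1.get? q =
      pvAW ((rows.foldl pvGroupStep g).getD q [])) ∧
    (∀ q, (rows.foldl pvGroupStep g).contains q = true →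
      (rows.foldl pvGroupStep g).getD q [] ≠ []) := by
  induction rows generalizing d ord g with
  | nil => exact ⟨hord, hnd, hval, hne⟩
  | cons row rows ih =>
    simp only [List.foldl_cons]
    by_cases hq : pvQid row = ""
    · rw [show pvStepA (d, ord) row = (d, ord) by simp [pvStepA, hq],
          show pvGroupStep g row = g by simp [pvGroupStep, hq]]
      exact ih d ord g hord hnd hval hne
    · -- d.contains q = g.contains q at the current id
      have hcont : d.contains (pvQid row) = g.contains (pvQid row) := by
        rw [PySem.Dict.contains_eq_isSome_get?, hval (pvQid row)]
        cases hgc : g.contains (pvQid row) with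
        | true =>
          have hx := hne (pvQid row) hgc
          cases hgrp : g.getD (pvQid row) [] with
          | nil => exact absurd hgrp hx
          | cons x l => simp [pvAW_cons]
        | false =>
          rw [PySem.Dict.getD_of_not_contains g [] hgc]
          rfl
      have hg' : pvGroupStep g row = g.modify (pvQid row) [] (· ++ [row]) := by
        simp only [pvGroupStep]
        rw [if_neg hq]
      -- keys of the new group dict
      have hkeys' : (g.modify (pvQid row) [] (· ++ [row])).keys =
          if g.contains (pvQid row) then g.keys else g.keys ++ [pvQid row] := by
        rw [PySem.Dict.keys_modify]
        cases hgc : g.contains (pvQid row) with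
        | true => rw [PySem.Dict.keys_insert_of_contains g _ hgc]; rfl
        | false => rw [PySem.Dict.keys_insert_of_not_contains g _ hgc]; rfl
      have hnd' : (g.modify (pvQid row) [] (· ++ [row])).keys.Nodup := by
        rw [PySem.Dict.keys_modify]
        exact PySem.Dict.nodup_keys_insert _ _ _ hnd
      have hne' : ∀ q, (g.modify (pvQid row) [] (· ++ [row])).contains q = true →
          (g.modify (pvQid row) [] (· ++ [row])).getD q [] ≠ [] := by
        intro q hc
        by_cases hqq : q = pvQid row
        · rw [hqq, PySem.Dict.getD_modify_self]
          simp
        · rw [PySem.Dict.getD_modify_of_ne g [] _ hqq]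
          rw [PySem.Dict.contains_modify] at hc
          simp only [Bool.or_eq_true, beq_iff_eq] at hc
          exact hne q (hc.resolve_left hqq)
      -- value of the new group dict at any key
      have hgetD : ∀ q, (g.modify (pvQid row) [] (· ++ [row])).getD q [] =
          if q = pvQid row then g.getD (pvQid row) [] ++ [row] else g.getD q [] := by
        intro q
        by_cases hqq : q = pvQid row
        · rw [if_pos hqq, hqq, PySem.Dict.getD_modify_self]
        · rw [if_neg hqq, PySem.Dict.getD_modify_of_ne g [] _ hqq]
      -- the A step's order component
      have hordA : (pvStepA (d, ord) row).2 =
          if g.contains (pvQid row) then ord else ord ++ [pvQid row] := by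
        simp only [pvStepA]
        rw [if_neg hq]
        simp only [hcont]
        cases d.get? (pvQid row) with
        | none => rfl
        | some cur =>
          by_cases h1 : pvHasAns row && !pvHasAns cur
          · simp [h1]
          · by_cases h2 : pvHasAns row == pvHasAns cur <;> simp [h1, h2]
      -- the A step's dict component satisfies the value invariant
      have hvalA : ∀ q, (pvStepA (d, ord) row).1.get? q =
          pvAW ((g.modify (pvQid row) [] (· ++ [row])).getD q []) := by
        intro q
        have hrhs : pvAW ((g.modify (pvQid row) [] (· ++ [row])).getD q []) =
            if q = pvQid row then pvStep2 (d.get? (pvQid row)) row else d.get? q := by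
          rw [hgetD q]
          by_cases hqq : q = pvQid row
          · rw [if_pos hqq, if_pos hqq]
            rw [show pvAW (g.getD (pvQid row) [] ++ [row]) =
                pvStep2 (pvAW (g.getD (pvQid row) [])) row from by
              simp [pvAW, List.foldl_append]]
            rw [hval (pvQid row)]
          · rw [if_neg hqq, if_neg hqq, hval q]
        rw [hrhs]
        simp only [pvStepA]
        rw [if_neg hq]
        cases hd : d.get? (pvQid row) with
        | none =>
          simp only
          by_cases hqq : q = pvQid row
          · rw [if_pos hqq, hqq, PySem.Dict.get?_insert_self]
            rfl
          · rw [if_neg hqq, PySem.Dict.get?_insert_of_ne d _ hqq]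
        | some cur =>
          simp only
          by_cases hqq : q = pvQid row
          · rw [if_pos hqq, hqq]
            by_cases hr : pvHasAns row <;> by_cases hc : pvHasAns cur <;>
              simp [hr, hc, pvStep2, PySem.Dict.get?_insert_self, hd]
          · rw [if_neg hqq]
            by_cases hr : pvHasAns row <;> by_cases hc : pvHasAns cur <;>
              simp [hr, hc, PySem.Dict.get?_insert_of_ne d _ hqq]
      -- the order components agree
      have hstA : (pvStepA (d, ord) row).2 = (g.modify (pvQid row) [] (· ++ [row])).keys := by
        rw [hordA, hkeys']
        cases hgc : g.contains (pvQid row) with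
        | true => simp [hord]
        | false => simp [hord]
      have hrec := ih (pvStepA (d, ord) row).1 (pvStepA (d, ord) row).2
        (g.modify (pvQid row) [] (· ++ [row])) hstA hnd' hvalA hne'
      rw [hg']
      simpa using hrec

-- ===== VERDICT (by name: the statement is the Claim_ definition above) =====
theorem deduplicate_qa_index_rows_spec : Claim_equal_deduplicate_qa_index_rows := by
  unfold Claim_equal_deduplicate_qa_index_rows
  intro rows _
  unfold Spec_deduplicate_qa_index_rows
  unfold deduplicate_qa_index_rows deduplicate_qa_index_rows_alt
  have h0 := pvMain rows PySem.Dict.empty [] PySem.Dict.empty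
    (by simp) (by simp) (by intro q; simp [pvAW]) (by intro q h; simp at h)
  obtain ⟨hord, hnd, hval, hne⟩ := h0
  set g := rows.foldl pvGroupStep (PySem.Dict.empty :
    PySem.Dict String (List (List (String × String)))) with hg
  rw [PySem.Dict.values_eq_map_keys g hnd []]
  simp only [List.map_map, hord]
  apply List.filterMap_eq_map_iff_forall_eq_some.mpr
  intro q hmem
  rw [hval q]
  have hc : g.contains q = true := by
    rw [PySem.Dict.contains_iff_mem_keys]; exact hmem
  cases hgrp : g.getD q [] with
  | nil => exact absurd hgrp (hne q hc)
  | cons x l => rw [pvAW_cons]; simp [hgrp]
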